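-- pv_equiv track=rewrite | github.com/frymash/NUS-CS1010X | tutorials/tut06/tut06.py | at_least_n
-- ===== SOURCE A (Python) =====
-- def at_least_n(lst,n):
--     i = 0
--     while i < len(lst):
--         if lst[i] < n:
--             lst.pop(i)
--         else:
--             i += 1
--     return lst
-- ===== SOURCE B (Python) =====
-- def at_least_n(lst, n):
--     write = 0
--     for x in lst:
--         if not (x < n):
--             lst[write] = x
--             write += 1
--     del lst[write:]
--     return lst
-- ===== Notes on version B (the rewrite author's own statement) =====
-- stated objective: faster
-- what changed: Replaces the index-scan with repeated lst.pop(i) (each pop shifts the tail) by a single in-place two-pointer compaction pass with one final truncation.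
import Mathlib
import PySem

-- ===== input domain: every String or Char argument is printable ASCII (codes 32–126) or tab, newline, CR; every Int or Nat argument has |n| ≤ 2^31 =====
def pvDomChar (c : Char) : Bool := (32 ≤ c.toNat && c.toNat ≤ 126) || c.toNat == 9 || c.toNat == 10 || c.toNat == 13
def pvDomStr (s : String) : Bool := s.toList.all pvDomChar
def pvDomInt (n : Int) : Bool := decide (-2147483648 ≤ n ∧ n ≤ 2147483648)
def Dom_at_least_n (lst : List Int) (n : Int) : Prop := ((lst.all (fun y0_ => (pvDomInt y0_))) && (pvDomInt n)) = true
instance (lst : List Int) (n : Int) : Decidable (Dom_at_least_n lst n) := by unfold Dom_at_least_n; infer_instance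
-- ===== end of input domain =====

-- B replaces A's repeated lst.pop(i) scan (quadratic moves) by a single two-pointer
-- compaction pass plus one truncation; return value equivalence is proved (both mutate
-- the caller's list in Python, ending in the same final list state).

-- ===== PORT A =====
-- A's while loop: i=0; while i < len(lst): if lst[i] < n then lst.pop(i) else i += 1.
-- lst.pop(i) with i in range removes index i = List.eraseIdx i (value discarded).
def atLeastLoopA (n : Int) (lst : List Int) (i : Nat) : List Int :=
  if h : i < lst.length then
    if lst[i]'h < n then atLeastLoopA n (lst.eraseIdx i) i
    else atLeastLoopA n lst (i + 1)
  else lst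
termination_by lst.length - i
decreasing_by
  · simp only [List.length_eraseIdx, if_pos h]; omega
  · omega

def at_least_n (lst : List Int) (n : Int) : List Int := atLeastLoopA n lst 0

-- ===== PORT B =====
-- B's for loop keeps x whenever not (x < n), writing kept elements to the front in order;
-- del lst[write:] truncates to exactly the kept elements: modelled as the kept-list accumulator.
def at_least_n_alt (lst : List Int) (n : Int) : List Int :=
  lst.foldl (fun kept x => if ¬ (x < n) then kept ++ [x] else kept) []

-- ===== PRECONDITION & SPEC =====
def Spec_at_least_n (lst : List Int) (n : Int) (out : List Int) : Prop := out = at_least_n_alt lst n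
instance (lst : List Int) (n : Int) (out : List Int) : Decidable (Spec_at_least_n lst n out) := by unfold Spec_at_least_n; infer_instance

-- ===== CLAIM (what is proved, stated in full; the proofs are below) =====
def Claim_equal_at_least_n : Prop := ∀ (lst : List Int) (n : Int), Dom_at_least_n lst n → Spec_at_least_n lst n (at_least_n lst n)

-- ===== LEMMAS AND PROOFS =====

theorem foldl_keep_eq_filter (n : Int) (xs acc : List Int) :
    xs.foldl (fun kept x => if ¬ (x < n) then kept ++ [x] else kept) acc
      = acc ++ xs.filter (fun x => !decide (x < n)) := by
  induction xs generalizing acc with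
  | nil => simp
  | cons x xs ih =>
    simp only [List.foldl_cons, List.filter_cons]
    by_cases h : x < n
    · rw [if_neg (not_not_intro h), ih]
      simp [h]
    · rw [if_pos h, ih]
      simp [h, List.append_assoc]

theorem atLeastLoopA_eq (n : Int) (lst : List Int) (i : Nat) :
    atLeastLoopA n lst i = lst.take i ++ (lst.drop i).filter (fun x => !decide (x < n)) := by
  fun_induction atLeastLoopA n lst i with
  | case1 lst i h hlt ih =>
    have hlen : (lst.take i).length = i := by
      simp [Nat.min_eq_left (Nat.le_of_lt h)]
    rw [ih, List.eraseIdx_eq_take_drop_succ,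
        List.take_append_of_le_length (le_of_eq hlen.symm),
        List.drop_append_of_le_length (le_of_eq hlen.symm),
        List.take_take, List.drop_eq_getElem_cons h, List.filter_cons]
    simp [hlt, List.drop_of_length_le (le_of_eq hlen)]
  | case2 lst i h hlt ih =>
    have htake : lst.take (i + 1) = lst.take i ++ [lst[i]] := by
      rw [List.take_succ, List.getElem?_eq_getElem h]; rfl
    rw [ih, List.drop_eq_getElem_cons h, List.filter_cons, htake, List.append_assoc]
    simp only [decide_eq_false hlt, Bool.not_false, if_true, List.singleton_append]
  | case3 lst i h =>
    have : lst.length ≤ i := by omega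
    simp [List.take_of_length_le this, List.drop_of_length_le this]

theorem at_least_n_spec : Claim_equal_at_least_n := by
  intro lst n _
  unfold Spec_at_least_n at_least_n at_least_n_alt
  rw [atLeastLoopA_eq, foldl_keep_eq_filter]
  simp
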